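-- pv_equiv track=rewrite | github.com/RomanSiu/PW_HW6 | fill_data.py | gen_groups
-- ===== SOURCE A (Python) =====
-- def gen_groups(quantity):
--     group_lst = []
--     num = 1
--     group_num = 1
--     for i in range(quantity):
--         group = (i+1, group_num)
--         group_lst.append(group)
--         num += 1
--         if num == 18:
--             group_num += 1
--             num = 1
--     return group_lst
-- ===== SOURCE B (Python) =====
-- def gen_groups(quantity):
--     # Chunked construction: emit complete groups of 17 via divmod, then the
--     # partial last group, instead of a per-element counter state machine.
--     if quantity <= 0:
--         return []
--     full, rem = divmod(quantity, 17)
--     out = []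
--     for g in range(1, full + 1):
--         base = 17 * (g - 1)
--         for j in range(17):
--             out.append((base + j + 1, g))
--     base = 17 * full
--     for j in range(rem):
--         out.append((base + j + 1, full + 1))
--     return out
-- ===== Notes on version B (the rewrite author's own statement) =====
-- stated objective: alternative
-- what changed: Replaces A's per-element counter/reset state machine by a chunked construction: divmod(quantity, 17) splits the work into complete groups emitted by a nested loop over group numbers and member offsets, plus one partial trailing group.
import Mathlib
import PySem

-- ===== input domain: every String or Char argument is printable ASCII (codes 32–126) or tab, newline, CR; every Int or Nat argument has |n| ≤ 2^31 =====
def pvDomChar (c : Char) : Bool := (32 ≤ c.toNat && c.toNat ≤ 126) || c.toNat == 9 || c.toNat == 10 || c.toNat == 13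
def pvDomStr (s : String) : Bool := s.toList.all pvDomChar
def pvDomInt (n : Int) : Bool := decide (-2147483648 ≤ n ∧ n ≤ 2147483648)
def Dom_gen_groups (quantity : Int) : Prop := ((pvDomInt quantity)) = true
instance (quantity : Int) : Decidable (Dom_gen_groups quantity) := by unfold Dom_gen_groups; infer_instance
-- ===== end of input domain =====

-- ===== PORT A =====
-- B builds the list chunk by chunk (divmod(quantity,17): full groups, then the partial one) instead of A's per-element counter/reset state machine; alternative decomposition, same cost.
def gen_groups (quantity : Int) : List (Int × Int) :=
  ((PySem.List.pyRange 0 quantity 1).foldl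
    (fun (s : List (Int × Int) × Int × Int) i =>
      let group := (i + 1, s.2.2)
      let group_lst := s.1 ++ [group]
      let num := s.2.1 + 1
      if num == 18 then (group_lst, 1, s.2.2 + 1) else (group_lst, num, s.2.2))
    ([], 1, 1)).1

-- ===== PORT B =====
def gen_groups_alt (quantity : Int) : List (Int × Int) :=
  if quantity ≤ 0 then []
  else
    let full := PySem.Int.floordiv quantity 17
    let rem := PySem.Int.mod quantity 17
    let out := (PySem.List.pyRange 1 (full + 1) 1).foldl
      (fun out g =>
        let base := 17 * (g - 1)
        (PySem.List.pyRange 0 17 1).foldl (fun out j => out ++ [(base + j + 1, g)]) out)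
      []
    let base := 17 * full
    (PySem.List.pyRange 0 rem 1).foldl (fun out j => out ++ [(base + j + 1, full + 1)]) out

-- ===== PRECONDITION & SPEC =====
def Spec_gen_groups (quantity : Int) (out : List (Int × Int)) : Prop := out = gen_groups_alt quantity
instance (quantity : Int) (out : List (Int × Int)) : Decidable (Spec_gen_groups quantity out) := by unfold Spec_gen_groups; infer_instance

-- ===== CLAIM (what is proved, stated in full; the proofs are below) =====
def Claim_equal_gen_groups : Prop := ∀ (quantity : Int), Dom_gen_groups quantity → Spec_gen_groups quantity (gen_groups quantity)

-- ===== LEMMAS AND PROOFS =====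

-- A's loop: the final list is the closed-form map, with the counters in closed form too.
lemma gen_groups_loop (n : Nat) :
    (PySem.List.pyRange 0 n 1).foldl
      (fun (s : List (Int × Int) × Int × Int) i =>
        let group := (i + 1, s.2.2)
        let group_lst := s.1 ++ [group]
        let num := s.2.1 + 1
        if num == 18 then (group_lst, 1, s.2.2 + 1) else (group_lst, num, s.2.2))
      ([], 1, 1)
    = ((PySem.List.pyRange 0 n 1).map (fun i => (i + 1, i / 17 + 1)),
       (n : Int) % 17 + 1, (n : Int) / 17 + 1) := by
  induction n with
  | zero => simp
  | succ n ih =>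
      have h : PySem.List.pyRange 0 ((n : Int) + 1) 1
          = PySem.List.pyRange 0 (n : Int) 1 ++ [(n : Int)] := by
        simpa using PySem.List.pyRange_one_succ_right (a := 0) (b := (n : Int)) (by positivity)
      push_cast
      rw [h, List.foldl_append, List.map_append, ih]
      by_cases h17 : (n : Int) % 17 + 1 + 1 = 18
      · simp only [List.foldl_cons, List.foldl_nil, List.map_cons, List.map_nil, beq_iff_eq, Prod.mk.injEq,
          if_pos h17]
        refine ⟨trivial, by omega, by omega⟩
      · simp only [List.foldl_cons, List.foldl_nil, List.map_cons, List.map_nil, beq_iff_eq, Prod.mk.injEq,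
          if_neg h17]
        refine ⟨trivial, by omega, by omega⟩

-- One chunk of B: appending r members with base m (m a multiple of 17, 0 ≤ r ≤ 17)
-- is the closed-form map over the absolute index range [m, m+r).
lemma gen_groups_chunk (out : List (Int × Int)) (m r : Int)
    (hm : 0 ≤ m) (hdvd : 17 ∣ m) (hr0 : 0 ≤ r) (hr17 : r ≤ 17) :
    (PySem.List.pyRange 0 r 1).foldl (fun out j => out ++ [(m + j + 1, m / 17 + 1)]) out
      = out ++ (PySem.List.pyRange m (m + r) 1).map (fun i => (i + 1, i / 17 + 1)) := by
  rw [PySem.List.foldl_append_singleton_eq_map]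
  congr 1
  rw [PySem.List.pyRange_one 0 r, PySem.List.pyRange_one m (m + r)]
  simp only [List.map_map, add_sub_cancel_left, sub_zero]
  refine List.map_congr_left (fun k hk => ?_)
  have hk' : (k : Int) < r := by
    have := List.mem_range.1 hk; omega
  obtain ⟨q, rfl⟩ := hdvd
  simp only [Function.comp_apply, Prod.mk.injEq]
  constructor
  · ring
  · omega

-- B's outer loop over the full groups equals the closed-form map over [0, 17*full).
lemma gen_groups_full (full : Nat) :
    (PySem.List.pyRange 1 ((full : Int) + 1) 1).foldl
      (fun out g =>
        (PySem.List.pyRange 0 17 1).foldl (fun out j => out ++ [(17 * (g - 1) + j + 1, g)]) out)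
      []
    = (PySem.List.pyRange 0 (17 * (full : Int)) 1).map (fun i => (i + 1, i / 17 + 1)) := by
  induction full with
  | zero => simp
  | succ f ih =>
      have hsplit : PySem.List.pyRange 1 ((f : Int) + 1 + 1) 1
          = PySem.List.pyRange 1 ((f : Int) + 1) 1 ++ [(f : Int) + 1] := by
        simpa using PySem.List.pyRange_one_succ_right (a := 1) (b := (f : Int) + 1) (by omega)
      push_cast
      rw [hsplit, List.foldl_append, ih]
      simp only [List.foldl_cons, List.foldl_nil]
      have hg : ((f : Int) + 1 - 1) = (f : Int) := by ring
      have hchunk := gen_groups_chunk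
        ((PySem.List.pyRange 0 (17 * (f : Int)) 1).map (fun i => (i + 1, i / 17 + 1)))
        (17 * (f : Int)) 17 (by positivity) ⟨f, rfl⟩ (by norm_num) le_rfl
      have hq : (17 * (f : Int)) / 17 + 1 = (f : Int) + 1 := by omega
      rw [hg]
      rw [hq] at hchunk
      rw [hchunk, ← List.map_append, ← PySem.List.pyRange_one_append 0 (17 * (f : Int))
        (17 * (f : Int) + 17) (by positivity) (by omega)]
      ring_nf

-- ===== VERDICT (by name: the statement is the Claim_ definition above) =====
theorem gen_groups_spec : Claim_equal_gen_groups := by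
  intro q _
  unfold Spec_gen_groups gen_groups gen_groups_alt
  by_cases hq : q ≤ 0
  · rw [PySem.List.pyRange_one_eq_nil hq, if_pos hq]; rfl
  · rw [if_neg hq]
    obtain ⟨n, rfl⟩ : ∃ n : Nat, q = (n : Int) := ⟨q.toNat, by omega⟩
    have h17 : (0 : Int) < 17 := by norm_num
    rw [gen_groups_loop]
    simp only [PySem.Int.floordiv_eq_ediv_of_pos h17, PySem.Int.mod_eq_emod_of_pos h17]
    have hfull : ∃ f : Nat, (n : Int) / 17 = (f : Int) := ⟨((n : Int) / 17).toNat, by omega⟩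
    obtain ⟨f, hf⟩ := hfull
    rw [hf, gen_groups_full]
    have hchunk := gen_groups_chunk
      ((PySem.List.pyRange 0 (17 * (f : Int)) 1).map (fun i => (i + 1, i / 17 + 1)))
      (17 * (f : Int)) ((n : Int) % 17) (by positivity) ⟨f, rfl⟩ (by omega) (by omega)
    have hq17 : (17 * (f : Int)) / 17 = (f : Int) := by omega
    rw [hq17] at hchunk
    rw [hchunk, ← List.map_append, ← PySem.List.pyRange_one_append 0 (17 * (f : Int))
      (17 * (f : Int) + (n : Int) % 17) (by positivity) (by omega)]
    have : 17 * (f : Int) + (n : Int) % 17 = (n : Int) := by omega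
    rw [this]
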